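-- pv_equiv track=rewrite | github.com/acamposuribe/arquimedes | src/arquimedes/compile_pages.py | render_glossary
-- ===== SOURCE A (Python) =====
-- def _concept_wiki_path(slug: str) -> str:
--     """Return wiki-relative path: wiki/shared/concepts/{slug}.md"""
--     return f"wiki/shared/concepts/{slug}.md"
--
-- def render_glossary(clusters: list[dict]) -> str:
--     """Render alphabetical glossary of main concept names → concept pages."""
--     lines: list[str] = []
--     lines.append("# Main Concepts\n")
--     lines.append("_Alphabetical index of canonical main concept names._\n")
--
--     sorted_clusters = sorted(clusters, key=lambda c: c.get("canonical_name", "").lower())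
--     current_letter = ""
--     for c in sorted_clusters:
--         name = c.get("canonical_name", "")
--         slug = c.get("slug", "")
--         if not name or not slug:
--             continue
--         letter = name[0].upper()
--         if letter != current_letter:
--             current_letter = letter
--             lines.append(f"\n### {letter}\n")
--         path = c.get("wiki_path") or _concept_wiki_path(slug)
--         link_label = name
--         if "/bridge-concepts/" in path:
--             link_label += " (main)"
--         lines.append(f"- [{link_label}]({path})")
--
--     lines.append("")
--     return "\n".join(lines)
-- ===== SOURCE B (Python) =====
-- def _concept_wiki_path(slug: str) -> str:
--     return f"wiki/shared/concepts/{slug}.md"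
--
-- def _entry(c: dict):
--     """(letter, formatted link line) for a kept cluster, else None."""
--     name = c.get("canonical_name", "")
--     slug = c.get("slug", "")
--     if not name or not slug:
--         return None
--     path = c.get("wiki_path") or _concept_wiki_path(slug)
--     label = name + " (main)" if "/bridge-concepts/" in path else name
--     return name[0].upper(), f"- [{label}]({path})"
--
-- def render_glossary(clusters: list[dict]) -> str:
--     """Render alphabetical glossary: group link lines by first letter, then emit."""
--     groups: dict[str, list[str]] = {}
--     for c in sorted(clusters, key=lambda c: c.get("canonical_name", "").lower()):
--         e = _entry(c)
--         if e is not None: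
--             letter, line = e
--             groups[letter] = groups.get(letter, []) + [line]
--     out = ["# Main Concepts\n", "_Alphabetical index of canonical main concept names._\n"]
--     for letter, lines in groups.items():
--         out.append(f"\n### {letter}\n")
--         out.extend(lines)
--     out.append("")
--     return "\n".join(out)
-- ===== Notes on version B (the rewrite author's own statement) =====
-- stated objective: alternative
-- what changed: A's single stateful pass that tracks current_letter while appending headers is replaced by a two-phase decomposition: one pass builds an insertion-ordered dict from first letter to its formatted link lines, then the output is emitted by iterating that dict.
import Mathlib
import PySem

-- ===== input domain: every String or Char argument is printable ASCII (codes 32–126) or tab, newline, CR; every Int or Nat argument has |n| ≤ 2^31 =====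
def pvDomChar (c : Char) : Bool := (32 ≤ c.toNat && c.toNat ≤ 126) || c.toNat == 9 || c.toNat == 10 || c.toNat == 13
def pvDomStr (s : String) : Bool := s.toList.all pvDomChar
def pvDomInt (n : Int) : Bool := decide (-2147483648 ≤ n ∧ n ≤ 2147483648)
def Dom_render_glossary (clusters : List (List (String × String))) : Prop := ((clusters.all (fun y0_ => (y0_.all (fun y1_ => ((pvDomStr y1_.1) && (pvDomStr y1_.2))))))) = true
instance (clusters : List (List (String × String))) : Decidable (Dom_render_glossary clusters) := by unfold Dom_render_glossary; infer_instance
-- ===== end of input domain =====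

-- B replaces A's current_letter-tracking single pass by a two-phase build-groups-then-emit
-- decomposition (insertion-ordered dict from first letter to its link lines); objective: alternative.

-- ===== PORT A =====
def concept_wiki_path (slug : String) : String :=
  "wiki/shared/concepts/" ++ slug ++ ".md"

-- loop body of A's 'for c in sorted_clusters' (state = (current_letter, lines))
def glossStep (st : String × List String) (c : List (String × String)) : String × List String :=
  let name := (PySem.Dict.mk c).getD "canonical_name" ""
  let slug := (PySem.Dict.mk c).getD "slug" ""
  if name = "" ∨ slug = "" then st
  else
    let letter : String := match name.toList with
      | [] => ""                     -- unreachable under the guard name ≠ "" (name[0] IndexError)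
      | ch :: _ => String.ofList [PySem.Chars.upperChar ch]
    let st1 : String × List String :=
      if letter ≠ st.1 then (letter, st.2 ++ ["\n### " ++ letter ++ "\n"]) else st
    let wp := (PySem.Dict.mk c).getD "wiki_path" ""   -- '' stands for Python's falsy None/'' in 'or'
    let path := if wp = "" then concept_wiki_path slug else wp
    let link_label := if PySem.Str.isIn "/bridge-concepts/" path then name ++ " (main)" else name
    (st1.1, st1.2 ++ ["- [" ++ link_label ++ "](" ++ path ++ ")"])

def render_glossary (clusters : List (List (String × String))) : String :=
  let lines : List String := ["# Main Concepts\n", "_Alphabetical index of canonical main concept names._\n"]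
  let sorted_clusters := PySem.List.sorted clusters
    (fun c => PySem.Str.lower ((PySem.Dict.mk c).getD "canonical_name" ""))
  let st := sorted_clusters.foldl glossStep ("", lines)
  PySem.Str.join "\n" (st.2 ++ [""])

-- ===== PORT B =====
-- Source B's _entry: (letter, formatted link line) for a kept cluster, else None
def entry? (c : List (String × String)) : Option (String × String) :=
  let name := (PySem.Dict.mk c).getD "canonical_name" ""
  let slug := (PySem.Dict.mk c).getD "slug" ""
  if name = "" ∨ slug = "" then none
  else
    let wp := (PySem.Dict.mk c).getD "wiki_path" ""
    let path := if wp = "" then concept_wiki_path slug else wp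
    let label := if PySem.Str.isIn "/bridge-concepts/" path then name ++ " (main)" else name
    let letter : String := match name.toList with
      | [] => ""
      | ch :: _ => String.ofList [PySem.Chars.upperChar ch]
    some (letter, "- [" ++ label ++ "](" ++ path ++ ")")

-- loop body of Source B's grouping pass
def groupStep (d : PySem.Dict String (List String)) (c : List (String × String)) :
    PySem.Dict String (List String) :=
  match entry? c with
  | none => d
  | some e => d.insert e.1 (d.getD e.1 [] ++ [e.2])

def render_glossary_alt (clusters : List (List (String × String))) : String :=
  let groups : PySem.Dict String (List String) :=
    (PySem.List.sorted clusters
      (fun c => PySem.Str.lower ((PySem.Dict.mk c).getD "canonical_name" ""))).foldl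
      groupStep PySem.Dict.empty
  let out : List String := ["# Main Concepts\n", "_Alphabetical index of canonical main concept names._\n"]
  let out := groups.items.foldl (fun out p => out ++ ("\n### " ++ p.1 ++ "\n") :: p.2) out
  PySem.Str.join "\n" (out ++ [""])

-- ===== PRECONDITION & SPEC =====
def Spec_render_glossary (clusters : List (List (String × String))) (out : String) : Prop := out = render_glossary_alt clusters
instance (clusters : List (List (String × String))) (out : String) : Decidable (Spec_render_glossary clusters out) := by unfold Spec_render_glossary; infer_instance

-- ===== CLAIM (what is proved, stated in full; the proofs are below) =====
def Claim_equal_render_glossary : Prop := ∀ (clusters : List (List (String × String))), Dom_render_glossary clusters → Spec_render_glossary clusters (render_glossary clusters)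

-- ===== LEMMAS AND PROOFS =====

-- ---- character facts (PySem upper/lower on arbitrary chars) ----
theorem pvCharLe (a c : Char) : (a ≤ c) ↔ (a.toNat ≤ c.toNat) := by
  rw [Char.le_def, UInt32.le_iff_toNat_le, Char.toNat_val, Char.toNat_val]

theorem pvIslower (c : Char) : PySem.Chars.islower c = true ↔ (97 ≤ c.toNat ∧ c.toNat ≤ 122) := by
  have h1 : 'a'.toNat = 97 := rfl
  have h2 : 'z'.toNat = 122 := rfl
  simp [PySem.Chars.islower, pvCharLe, h1, h2]

theorem pvIsupper (c : Char) : PySem.Chars.isupper c = true ↔ (65 ≤ c.toNat ∧ c.toNat ≤ 90) := by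
  have h1 : 'A'.toNat = 65 := rfl
  have h2 : 'Z'.toNat = 90 := rfl
  simp [PySem.Chars.isupper, pvCharLe, h1, h2]

theorem pvOfNatToNat (n : Nat) (h : n < 55296) : (Char.ofNat n).toNat = n := by
  rw [Char.toNat_ofNat, if_pos]; left; exact h

theorem pvUpperLower (c : Char) :
    PySem.Chars.upperChar (PySem.Chars.lowerChar c) = PySem.Chars.upperChar c := by
  rw [PySem.Chars.lowerChar]
  by_cases hu : PySem.Chars.isupper c = true
  · rw [if_pos hu]
    rw [pvIsupper] at hu
    have ht : (Char.ofNat (c.toNat + 32)).toNat = c.toNat + 32 := pvOfNatToNat _ (by omega)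
    rw [PySem.Chars.upperChar, PySem.Chars.upperChar]
    rw [if_pos (by rw [pvIslower, ht]; omega), if_neg (by rw [pvIslower]; omega)]
    have he : c.toNat + 32 - 32 = c.toNat := by omega
    rw [ht, he, Char.ofNat_toNat]
  · rw [if_neg hu]

theorem pvLowerUpper (c : Char) :
    PySem.Chars.lowerChar (PySem.Chars.upperChar c) = PySem.Chars.lowerChar c := by
  rw [PySem.Chars.upperChar]
  by_cases hl : PySem.Chars.islower c = true
  · rw [if_pos hl]
    rw [pvIslower] at hl
    have ht : (Char.ofNat (c.toNat - 32)).toNat = c.toNat - 32 := pvOfNatToNat _ (by omega)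
    rw [PySem.Chars.lowerChar, PySem.Chars.lowerChar]
    rw [if_pos (by rw [pvIsupper, ht]; omega), if_neg (by rw [pvIsupper]; omega)]
    have he : c.toNat - 32 + 32 = c.toNat := by omega
    rw [ht, he, Char.ofNat_toNat]
  · rw [if_neg hl]

-- ---- proof-side vocabulary ----
def nameOf (c : List (String × String)) : String := (PySem.Dict.mk c).getD "canonical_name" ""
def keyOf (c : List (String × String)) : String := PySem.Str.lower (nameOf c)
def hdrStr (L : String) : String := "\n### " ++ L ++ "\n"
def mval (p : String × String) : Char := PySem.Chars.lowerChar (p.1.toList.headD 'a')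

def pairStepA (st : String × List String) (p : String × String) : String × List String :=
  (p.1, st.2 ++ (if p.1 ≠ st.1 then [hdrStr p.1] else []) ++ [p.2])

def insStep (d : PySem.Dict String (List String)) (p : String × String) :
    PySem.Dict String (List String) :=
  d.insert p.1 (d.getD p.1 [] ++ [p.2])

def emitA : String → List (String × String) → List String
  | _, [] => []
  | cur, p :: t => (if p.1 ≠ cur then [hdrStr p.1] else []) ++ p.2 :: emitA p.1 t

def lastFst : String → List (String × String) → String
  | cur, [] => cur
  | _, p :: t => lastFst p.1 t

def grCons (p : String × String) : List (String × List String) → List (String × List String)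
  | [] => [(p.1, [p.2])]
  | (L, ls) :: gs => if p.1 = L then (L, p.2 :: ls) :: gs else (p.1, [p.2]) :: (L, ls) :: gs

def groupRuns : List (String × String) → List (String × List String)
  | [] => []
  | p :: t => grCons p (groupRuns t)

def expand (gs : List (String × List String)) : List (String × String) :=
  gs.flatMap (fun g => g.2.map (fun l => (g.1, l)))

theorem expand_cons (L : String) (ls : List String) (gs : List (String × List String)) :
    expand ((L, ls) :: gs) = ls.map (fun l => (L, l)) ++ expand gs := by
  simp [expand]

-- ---- the A loop body, through entry? ----
theorem glossStep_none (st : String × List String) (c : List (String × String))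
    (h : entry? c = none) : glossStep st c = st := by
  by_cases h1 : ((PySem.Dict.mk c).getD "canonical_name" "" = "" ∨ (PySem.Dict.mk c).getD "slug" "" = "")
  · simp only [glossStep]
    rw [if_pos h1]
  · simp only [entry?] at h
    rw [if_neg h1] at h
    simp at h

theorem glossStep_some (st : String × List String) (c : List (String × String))
    (p : String × String) (h : entry? c = some p) : glossStep st c = pairStepA st p := by
  by_cases h1 : ((PySem.Dict.mk c).getD "canonical_name" "" = "" ∨ (PySem.Dict.mk c).getD "slug" "" = "")
  · simp only [entry?] at h
    rw [if_pos h1] at h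
    simp at h
  · simp only [entry?] at h
    rw [if_neg h1] at h
    simp only [Option.some.injEq] at h
    subst h
    simp only [glossStep, pairStepA, hdrStr, if_neg h1]
    split_ifs <;> simp_all [List.append_assoc]

theorem foldA (xs : List (List (String × String))) (st : String × List String) :
    xs.foldl glossStep st = (xs.filterMap entry?).foldl pairStepA st := by
  induction xs generalizing st with
  | nil => rfl
  | cons c t ih =>
    cases h : entry? c with
    | none => simp [h, glossStep_none _ _ h, ih]
    | some p => simp [h, glossStep_some _ _ _ h, ih]

theorem foldA_emit (ps : List (String × String)) (cur : String) (acc : List String) :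
    ps.foldl pairStepA (cur, acc) = (lastFst cur ps, acc ++ emitA cur ps) := by
  induction ps generalizing cur acc with
  | nil => simp [emitA, lastFst]
  | cons p t ih =>
    show List.foldl pairStepA (pairStepA (cur, acc) p) t = _
    rw [pairStepA, ih]
    simp [emitA, lastFst]

-- ---- the B loop body, through entry? ----
theorem foldB (xs : List (List (String × String))) (d : PySem.Dict String (List String)) :
    xs.foldl groupStep d = (xs.filterMap entry?).foldl insStep d := by
  induction xs generalizing d with
  | nil => rfl
  | cons c t ih =>
    cases h : entry? c with
    | none => simp [h, groupStep, ih]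
    | some p => simp [h, groupStep, insStep, ih]

theorem runFold (ls : List String) (L : String) (v : List String)
    (d : PySem.Dict String (List String)) :
    ((ls.map (fun l => (L, l))).foldl insStep (d.insert L v)) = d.insert L (v ++ ls) := by
  induction ls generalizing v with
  | nil => simp
  | cons l t ih =>
    show List.foldl insStep (insStep (d.insert L v) (L, l)) (t.map _) = _
    rw [insStep]
    simp only [PySem.Dict.getD_insert_self, PySem.Dict.insert_insert_self]
    rw [ih (v ++ [l])]
    simp

theorem foldB_groups : ∀ (gs : List (String × List String)) (d : PySem.Dict String (List String)),
    (∀ g ∈ gs, d.contains g.1 = false) → ((gs.map Prod.fst).Nodup) →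
    (∀ g ∈ gs, g.2 ≠ []) →
    ((expand gs).foldl insStep d).items = d.items ++ gs := by
  intro gs
  induction gs with
  | nil => intro d _ _ _; simp [expand]
  | cons g t ih =>
    intro d hc hn hne
    have hn1 : g.1 ∉ t.map Prod.fst ∧ (t.map Prod.fst).Nodup := by
      rw [List.map_cons, List.nodup_cons] at hn; exact hn
    obtain ⟨l, ls, hg2⟩ : ∃ l ls, g.2 = l :: ls := by
      cases h2 : g.2 with
      | nil => exact absurd h2 (hne g (by simp))
      | cons a b => exact ⟨a, b, rfl⟩
    have hstep : insStep d (g.1, l) = d.insert g.1 [l] := by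
      rw [insStep]
      rw [PySem.Dict.getD_of_not_contains d [] (hc g (by simp))]
      simp
    have hrun : ((g.2.map (fun x => (g.1, x))).foldl insStep d) = d.insert g.1 g.2 := by
      rw [hg2]
      show List.foldl insStep (insStep d (g.1, l)) (ls.map _) = _
      rw [hstep, runFold]
      simp
    have hrec := ih (d.insert g.1 g.2)
      (by
        intro g' hg'
        rw [PySem.Dict.contains_insert]
        have hne1 : g'.1 ≠ g.1 := by
          intro he
          exact hn1.1 (by rw [← he]; exact List.mem_map_of_mem hg')
        simp [hne1, hc g' (List.mem_cons_of_mem _ hg')])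
      hn1.2
      (fun g' hg' => hne g' (List.mem_cons_of_mem _ hg'))
    rw [expand, List.flatMap_cons, List.foldl_append, ← expand, hrun, hrec]
    rw [PySem.Dict.items_insert_of_not_contains d g.2 (hc g (by simp))]
    simp

-- ---- emitA over the run decomposition ----
theorem emitA_run (ls : List String) (L : String) (t : List (String × String)) :
    emitA L (ls.map (fun l => (L, l)) ++ t) = ls ++ emitA L t := by
  induction ls with
  | nil => simp
  | cons l ls ih => simp [emitA, ih]

theorem emitA_expand : ∀ (gs : List (String × List String)) (cur : String),
    (∀ g ∈ gs, g.2 ≠ []) → (cur :: gs.map Prod.fst).Nodup →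
    emitA cur (expand gs) = gs.flatMap (fun g => hdrStr g.1 :: g.2) := by
  intro gs
  induction gs with
  | nil => intro cur _ _; simp [expand, emitA]
  | cons g t ih =>
    intro cur hne hn
    obtain ⟨l, ls, hg2⟩ : ∃ l ls, g.2 = l :: ls := by
      cases h2 : g.2 with
      | nil => exact absurd h2 (hne g (by simp))
      | cons a b => exact ⟨a, b, rfl⟩
    have hcur : g.1 ≠ cur := by
      have h0 := (List.nodup_cons.mp hn).1
      intro he; exact h0 (by simp [← he])
    obtain ⟨L, ls0⟩ := g
    simp only at hg2 hcur
    subst hg2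
    rw [expand_cons]
    show emitA cur ((L, l) :: (ls.map (fun x => (L, x)) ++ _)) = _
    rw [emitA, if_pos hcur, emitA_run]
    rw [ih L (fun g' h => hne g' (List.mem_cons_of_mem _ h))
        (by
          have h2 := List.nodup_cons.mp hn
          rw [List.map_cons] at h2
          have h3 := h2.2
          exact h3)]
    simp

-- ---- groupRuns facts ----
theorem gr_expand (ps : List (String × String)) : expand (groupRuns ps) = ps := by
  induction ps with
  | nil => rfl
  | cons p t ih =>
    rw [groupRuns]
    cases h : groupRuns t with
    | nil =>
      have ht : t = [] := by rw [h] at ih; simpa [expand] using ih.symm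
      subst ht
      simp [grCons, expand]
    | cons g gs =>
      obtain ⟨L, ls⟩ := g
      rw [h] at ih
      rw [expand_cons] at ih
      by_cases hL : p.1 = L
      · rw [grCons, if_pos hL, expand_cons]
        rw [List.map_cons, List.cons_append, ih]
        have hp : (L, p.2) = p := by rw [← hL]
        rw [hp]
      · rw [grCons, if_neg hL, expand_cons, expand_cons]
        rw [ih]
        simp

theorem gr_nonempty (ps : List (String × String)) : ∀ g ∈ groupRuns ps, g.2 ≠ [] := by
  induction ps with
  | nil => simp [groupRuns]
  | cons p t ih =>
    rw [groupRuns]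
    cases h : groupRuns t with
    | nil => simp [grCons]
    | cons g gs =>
      obtain ⟨L, ls⟩ := g
      rw [h] at ih
      by_cases hL : p.1 = L
      · rw [grCons, if_pos hL]
        intro g' hg'
        rcases List.mem_cons.mp hg' with h1 | h1
        · subst h1; simp
        · exact ih g' (List.mem_cons_of_mem _ h1)
      · rw [grCons, if_neg hL]
        intro g' hg'
        rcases List.mem_cons.mp hg' with h1 | h1
        · subst h1; simp
        · exact ih g' h1

theorem gr_sub (ps : List (String × String)) :
    ∀ L ∈ (groupRuns ps).map Prod.fst, ∃ q ∈ ps, q.1 = L := by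
  induction ps with
  | nil => simp [groupRuns]
  | cons p t ih =>
    rw [groupRuns]
    cases h : groupRuns t with
    | nil =>
      simp [grCons]
    | cons g gs =>
      obtain ⟨L', ls⟩ := g
      rw [h] at ih
      by_cases hL : p.1 = L'
      · rw [grCons, if_pos hL]
        intro L hg'
        simp only [List.map_cons, List.mem_cons] at hg'
        rcases hg' with h1 | h1
        · exact ⟨p, by simp, by rw [hL, h1]⟩
        · obtain ⟨q, hq, hq1⟩ := ih L (by simp [h1])
          exact ⟨q, List.mem_cons_of_mem _ hq, hq1⟩
      · rw [grCons, if_neg hL]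
        intro L hg'
        simp only [List.map_cons, List.mem_cons] at hg'
        rcases hg' with h1 | h1
        · exact ⟨p, by simp, h1.symm⟩
        · obtain ⟨q, hq, hq1⟩ := ih L (by simpa using h1)
          exact ⟨q, List.mem_cons_of_mem _ hq, hq1⟩

theorem gr_nodup (ps : List (String × String))
    (hpair : ps.Pairwise (fun a b => mval a ≤ mval b))
    (hF : ∀ p ∈ ps, String.ofList [PySem.Chars.upperChar (mval p)] = p.1) :
    ((groupRuns ps).map Prod.fst).Nodup := by
  induction ps with
  | nil => simp [groupRuns]
  | cons p t ih =>
    have hm := (List.pairwise_cons.mp hpair).1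
    have hp' := (List.pairwise_cons.mp hpair).2
    have ihh := ih hp' (fun q hq => hF q (List.mem_cons_of_mem _ hq))
    rw [groupRuns]
    cases h : groupRuns t with
    | nil => simp [grCons]
    | cons g gs =>
      obtain ⟨L', ls⟩ := g
      rw [h] at ihh
      by_cases hL : p.1 = L'
      · rw [grCons, if_pos hL]
        exact ihh
      · rw [grCons, if_neg hL]
        simp only [List.map_cons]
        rw [List.nodup_cons]
        refine ⟨?_, by simpa using ihh⟩
        intro hmem
        obtain ⟨q, hq, hq1⟩ := gr_sub t p.1 (by rw [h]; simpa using hmem)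
        obtain ⟨x, t', rfl⟩ : ∃ x t', t = x :: t' := by
          cases t with
          | nil => rw [groupRuns] at h; simp at h
          | cons a b => exact ⟨a, b, rfl⟩
        have hxL : x.1 = L' := by
          have hxx : groupRuns (x :: t') = (L', ls) :: gs := h
          rw [groupRuns] at hxx
          cases h2 : groupRuns t' with
          | nil =>
            rw [h2] at hxx; simp [grCons] at hxx; exact hxx.1.1
          | cons g2 gs2 =>
            obtain ⟨L2, ls2⟩ := g2
            rw [h2] at hxx
            by_cases hx2 : x.1 = L2
            · rw [grCons, if_pos hx2] at hxx
              simp at hxx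
              rw [hx2, hxx.1.1]
            · rw [grCons, if_neg hx2] at hxx
              simp at hxx
              exact hxx.1.1
        have hqx : q ≠ x := fun he => hL (by rw [← hq1, he, hxL])
        have hqt' : q ∈ t' := by
          rcases List.mem_cons.mp hq with h1 | h1
          · exact absurd h1 hqx
          · exact h1
        have h1 : mval p ≤ mval x := hm x (by simp)
        have h2 : mval x ≤ mval q := (List.pairwise_cons.mp hp').1 q hqt'
        have h3 : mval q = mval p := by rw [mval, mval, hq1]
        have h4 : mval x = mval p := le_antisymm (by rw [← h3]; exact h2) h1
        have h5 : x.1 = p.1 := by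
          rw [← hF x (by simp), ← hF p (by simp), h4]
        exact hL (by rw [← h5, hxL])

-- ---- entry? shape facts ----
theorem entry?_shape (c : List (String × String)) (p : String × String)
    (h : entry? c = some p) :
    ∃ ch rest, (nameOf c).toList = ch :: rest ∧
      p.1 = String.ofList [PySem.Chars.upperChar ch] := by
  by_cases h1 : ((PySem.Dict.mk c).getD "canonical_name" "" = "" ∨ (PySem.Dict.mk c).getD "slug" "" = "")
  · simp only [entry?] at h
    rw [if_pos h1] at h
    simp at h
  · simp only [entry?] at h
    rw [if_neg h1] at h
    have hname : nameOf c ≠ "" := by rw [nameOf]; intro he; exact h1 (Or.inl he)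
    cases hn : (nameOf c).toList with
    | nil =>
      exact absurd (by simpa using congrArg String.ofList hn) hname
    | cons ch rest =>
      refine ⟨ch, rest, rfl, ?_⟩
      rw [nameOf] at hn
      rw [hn] at h
      simp only [Option.some.injEq] at h
      rw [← h]

theorem headLe (s t : String) (hle : s ≤ t) (hs : s.toList ≠ []) (ht : t.toList ≠ [])
    (d : Char) : s.toList.headD d ≤ t.toList.headD d := by
  rcases lt_or_eq_of_le hle with hlt | he
  · rw [String.lt_iff_toList_lt] at hlt
    cases hs2 : s.toList with
    | nil => exact absurd hs2 hs
    | cons a l1 =>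
      cases ht2 : t.toList with
      | nil => exact absurd ht2 ht
      | cons b l2 =>
        rw [hs2, ht2] at hlt
        rcases List.cons_lt_cons_iff.mp hlt with h1 | h1
        · simp [le_of_lt h1]
        · simp [h1.1]
  · subst he; rfl

theorem toList_keyOf (c : List (String × String)) :
    (keyOf c).toList = (nameOf c).toList.map PySem.Chars.lowerChar := by
  rw [keyOf]
  simp [PySem.Str.toList_lower, PySem.Chars.lower]

theorem mval_entry (c : List (String × String)) (p : String × String)
    (h : entry? c = some p) : mval p = (keyOf c).toList.headD 'a' := by
  obtain ⟨ch, rest, hn, hp1⟩ := entry?_shape c p h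
  rw [mval, hp1, toList_keyOf, hn]
  simp [pvLowerUpper]

theorem mval_F (c : List (String × String)) (p : String × String)
    (h : entry? c = some p) : String.ofList [PySem.Chars.upperChar (mval p)] = p.1 := by
  obtain ⟨ch, rest, hn, hp1⟩ := entry?_shape c p h
  rw [mval, hp1]
  simp [pvLowerUpper, pvUpperLower]

theorem letter_ne_empty (c : List (String × String)) (p : String × String)
    (h : entry? c = some p) : p.1 ≠ "" := by
  obtain ⟨ch, rest, hn, hp1⟩ := entry?_shape c p h
  rw [hp1]
  intro he
  have := congrArg String.toList he
  simp at this

-- ---- main assembly ----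

theorem key_eta :
    (fun c : List (String × String) => PySem.Str.lower ((PySem.Dict.mk c).getD "canonical_name" ""))
      = keyOf := rfl

theorem keyOf_ne_nil (c : List (String × String)) (p : String × String)
    (h : entry? c = some p) : (keyOf c).toList ≠ [] := by
  obtain ⟨ch, rest, hn, _⟩ := entry?_shape c p h
  rw [toList_keyOf, hn]
  simp

theorem ps_pairwise (clusters : List (List (String × String))) :
    ((PySem.List.sorted clusters keyOf false).filterMap entry?).Pairwise
      (fun a b => mval a ≤ mval b) := by
  have hs := PySem.List.sorted_pairwise clusters keyOf
  apply List.pairwise_filterMap.mpr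
  apply hs.imp
  intro a b hab p hp p' hp'
  rw [mval_entry a p hp, mval_entry b p' hp']
  have ha := keyOf_ne_nil a p hp
  have hb := keyOf_ne_nil b p' hp'
  cases h1 : (keyOf a).toList with
  | nil => exact absurd h1 ha
  | cons x xs =>
    cases h2 : (keyOf b).toList with
    | nil => exact absurd h2 hb
    | cons y ys =>
      have := headLe (keyOf a) (keyOf b) hab ha hb 'a'
      simpa [h1, h2] using this

theorem ps_F (clusters : List (List (String × String))) :
    ∀ p ∈ (PySem.List.sorted clusters keyOf false).filterMap entry?,
      String.ofList [PySem.Chars.upperChar (mval p)] = p.1 := by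
  intro p hp
  obtain ⟨c, _, hc⟩ := List.mem_filterMap.mp hp
  exact mval_F c p hc

theorem ps_letters_nodup (clusters : List (List (String × String))) :
    ("" :: ((groupRuns ((PySem.List.sorted clusters keyOf false).filterMap entry?)).map Prod.fst)).Nodup := by
  rw [List.nodup_cons]
  constructor
  · intro hmem
    obtain ⟨q, hq, hq1⟩ := gr_sub _ "" hmem
    obtain ⟨c, _, hc⟩ := List.mem_filterMap.mp hq
    exact letter_ne_empty c q hc hq1
  · exact gr_nodup _ (ps_pairwise clusters) (ps_F clusters)

-- ===== VERDICT (by name: the statement is the Claim_ definition above) =====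
theorem render_glossary_spec : Claim_equal_render_glossary := by
  intro clusters _
  unfold Spec_render_glossary
  simp only [render_glossary, render_glossary_alt]
  rw [key_eta]
  rw [foldA, foldA_emit, foldB]
  set ps := (PySem.List.sorted clusters keyOf false).filterMap entry? with hps
  rw [PySem.List.foldl_append_eq_flatMap (fun p : String × List String => ("\n### " ++ p.1 ++ "\n") :: p.2)]
  have hitems : ((ps.foldl insStep PySem.Dict.empty).items) = groupRuns ps := by
    conv_lhs => rw [← gr_expand ps]
    rw [foldB_groups (groupRuns ps) PySem.Dict.empty
      (fun g _ => PySem.Dict.contains_empty g.1)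
      (List.nodup_cons.mp (ps_letters_nodup clusters)).2
      (gr_nonempty ps)]
    rfl
  rw [hitems]
  have hemit : emitA "" ps = (groupRuns ps).flatMap (fun g => hdrStr g.1 :: g.2) := by
    conv_lhs => rw [← gr_expand ps]
    exact emitA_expand (groupRuns ps) "" (gr_nonempty ps) (ps_letters_nodup clusters)
  rw [hemit]
  simp [hdrStr]
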